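-- pv_equiv track=rewrite | github.com/Secre-C/PersonaSpriteTools | Sprite/utils.py | generate_spr_texture_name
-- ===== SOURCE A (Python) =====
-- def generate_spr_texture_name(spr_id: list):
--     result = 'spr_'
--     result += str(spr_id[0])
--     last_id: int = spr_id[0]
--     is_range: bool = False
--
--     for i in range(1, len(spr_id)):
--         if last_id == spr_id[i] - 1:
--             if not is_range:
--                result += '-'
--                is_range = True
--         else:
--             if is_range:
--                 result += str(last_id) + '_' + str(spr_id[i])
--                 is_range = False
--             else:
--                 result += '_' + str(spr_id[i])
--         last_id = spr_id[i]
--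
--     if is_range:
--         result += str(spr_id[-1])
--
--     return result
-- ===== SOURCE B (Python) =====
-- def generate_spr_texture_name(spr_id: list):
--     # group into maximal consecutive runs as (start, end) pairs, then format and join
--     runs = [(spr_id[0], spr_id[0])]
--     for x in spr_id[1:]:
--         s, e = runs[-1]
--         if x == e + 1:
--             runs[-1] = (s, x)
--         else:
--             runs.append((x, x))
--     parts = [str(s) if s == e else f"{s}-{e}" for s, e in runs]
--     return "spr_" + "_".join(parts)
-- ===== Notes on version B (the rewrite author's own statement) =====
-- stated objective: simpler
-- what changed: Replaces the incremental is_range flag with string splicing by a two-pass group-then-format decomposition: one scan builds (start,end) runs of consecutive ids, then each run is formatted and the parts are joined with '_'. Pre_ excludes only the empty list, where both A and B raise IndexError.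
import Mathlib
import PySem

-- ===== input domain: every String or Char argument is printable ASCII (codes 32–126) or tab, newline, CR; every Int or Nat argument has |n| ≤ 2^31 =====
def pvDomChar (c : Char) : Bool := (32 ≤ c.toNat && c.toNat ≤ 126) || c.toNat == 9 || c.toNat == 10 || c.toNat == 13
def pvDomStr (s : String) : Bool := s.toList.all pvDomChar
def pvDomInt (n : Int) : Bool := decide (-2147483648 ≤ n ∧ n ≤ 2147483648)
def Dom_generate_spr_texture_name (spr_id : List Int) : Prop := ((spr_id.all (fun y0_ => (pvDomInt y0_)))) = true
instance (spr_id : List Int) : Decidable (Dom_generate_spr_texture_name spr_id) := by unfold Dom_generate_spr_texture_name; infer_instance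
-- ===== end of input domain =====

-- B replaces A's incremental is_range/string-append loop by a group-into-runs-then-format-and-join decomposition (same behaviour; objective: simpler).


-- ===== PORT A =====
-- the for-loop over range(1, len(spr_id)): state (result, last_id, is_range); the string is built as List Char (PySem.Chars level), exact for str concatenation
def pvLoopA : List Int → List Char → Int → Bool → List Char × Int × Bool
  | [], result, last_id, is_range => (result, last_id, is_range)
  | x :: xs, result, last_id, is_range =>
    if last_id = x - 1 then
      if !is_range then pvLoopA xs (result ++ ['-']) x true
      else pvLoopA xs result x true
    else
      if is_range then pvLoopA xs (result ++ PySem.Int.toChars last_id ++ ['_'] ++ PySem.Int.toChars x) x false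
      else pvLoopA xs (result ++ ['_'] ++ PySem.Int.toChars x) x false

def generate_spr_texture_name (spr_id : List Int) : String :=
  match spr_id with
  | [] => ""          -- Python raises IndexError on spr_id[0]; excluded by Pre_
  | x0 :: rest =>
    let st := pvLoopA rest ("spr_".toList ++ PySem.Int.toChars x0) x0 false
    String.ofList
      (if st.2.2 then st.1 ++ PySem.Int.toChars ((PySem.List.pyGet? (x0 :: rest) (-1)).getD 0) else st.1)

-- ===== PORT B =====
-- grouping scan: current run (s, e), remaining ids; emits the completed runs in order
def pvRuns (s e : Int) : List Int → List (Int × Int)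
  | [] => [(s, e)]
  | x :: xs => if x = e + 1 then pvRuns s x xs else (s, e) :: pvRuns x x xs

def pvFmt (p : Int × Int) : List Char :=
  if p.1 = p.2 then PySem.Int.toChars p.1 else PySem.Int.toChars p.1 ++ '-' :: PySem.Int.toChars p.2

def generate_spr_texture_name_alt (spr_id : List Int) : String :=
  match spr_id with
  | [] => ""          -- Python raises IndexError on spr_id[0]; excluded by Pre_
  | x0 :: rest =>
    String.ofList ("spr_".toList ++ PySem.Chars.join ['_'] ((pvRuns x0 x0 rest).map pvFmt))

-- ===== PRECONDITION & SPEC =====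
-- Pre_ excludes exactly the empty list, on which Python A (and B alike) raises IndexError.
def Pre_generate_spr_texture_name (spr_id : List Int) : Prop := spr_id ≠ []
instance (spr_id : List Int) : Decidable (Pre_generate_spr_texture_name spr_id) := by unfold Pre_generate_spr_texture_name; infer_instance
def pvWitness_generate_spr_texture_name : List Int := [1, 2, 3, 7, 9, 10]

def Spec_generate_spr_texture_name (spr_id : List Int) (out : String) : Prop := out = generate_spr_texture_name_alt spr_id
instance (spr_id : List Int) (out : String) : Decidable (Spec_generate_spr_texture_name spr_id out) := by unfold Spec_generate_spr_texture_name; infer_instance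

-- ===== CLAIM (what is proved, stated in full; the proofs are below) =====
def Claim_equal_generate_spr_texture_name : Prop := ∀ (spr_id : List Int), Dom_generate_spr_texture_name spr_id → Pre_generate_spr_texture_name spr_id → Spec_generate_spr_texture_name spr_id (generate_spr_texture_name spr_id)

-- ===== LEMMAS AND PROOFS =====

theorem pv_getLastD (x e : Int) (xs : List Int) :
    xs.getLast?.getD x = (x :: xs).getLast?.getD e := by
  cases xs with
  | nil => simp
  | cons y ys =>
    rw [List.getLast?_cons_cons]
    cases h : (y :: ys).getLast? with
    | none => simp [List.getLast?_eq_none_iff] at h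
    | some v => simp

-- the loop's final last_id is the last element of the processed tail (e if none)
theorem pvLoopA_last (xs : List Int) (r : List Char) (e : Int) (b : Bool) :
    (pvLoopA xs r e b).2.1 = xs.getLast?.getD e := by
  induction xs generalizing r e b with
  | nil => simp [pvLoopA]
  | cons x xs ih => simp only [pvLoopA]; split_ifs <;> rw [ih, pv_getLastD]

theorem pvRuns_ne_nil (s e : Int) (xs : List Int) : pvRuns s e xs ≠ [] := by
  cases xs with
  | nil => simp [pvRuns]
  | cons x xs => simp only [pvRuns]; split_ifs <;> first | exact pvRuns_ne_nil _ _ _ | simp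

-- the partial string A has written for the current run (s..e)
def pvPfx (s e : Int) : List Char :=
  if s < e then PySem.Int.toChars s ++ ['-'] else PySem.Int.toChars e

-- A's final fix-up applied to the loop state
def pvFinish (st : List Char × Int × Bool) : List Char :=
  if st.2.2 then st.1 ++ PySem.Int.toChars st.2.1 else st.1

-- main invariant: started mid-run (s..e) with prefix q, A's loop produces q ++ the joined formatted runs
theorem pvLoopA_main (xs : List Int) (q : List Char) (s e : Int) (b : Bool)
    (hse : s ≤ e) (hb : b = decide (s < e)) :
    pvFinish (pvLoopA xs (q ++ pvPfx s e) e b) =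
      q ++ PySem.Chars.join ['_'] ((pvRuns s e xs).map pvFmt) := by
  induction xs generalizing q s e b with
  | nil =>
    subst hb
    simp only [pvLoopA, pvFinish, pvRuns, pvPfx, List.map, pvFmt]
    rcases lt_or_eq_of_le hse with h | h
    · simp [h, ne_of_lt h, PySem.Chars.join_singleton]
    · simp [h, PySem.Chars.join_singleton]
  | cons x xs ih =>
    simp only [pvLoopA, pvRuns]
    by_cases hx : x = e + 1
    · have hsx : s < x := by omega
      rw [if_pos (by omega : e = x - 1), if_pos hx]
      by_cases h : s < e
      · -- is_range already true: nothing written this step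
        rw [hb, decide_eq_true h, Bool.not_true, if_neg (by simp)]
        have hp : pvPfx s e = pvPfx s x := by simp [pvPfx, h, hsx]
        rw [hp]
        exact ih q s x true (le_of_lt hsx) (by simp [hsx])
      · -- is_range becomes true: write '-'
        have hse' : s = e := by omega
        rw [hb, decide_eq_false h, Bool.not_false, if_pos rfl]
        have hp : pvPfx s e ++ ['-'] = pvPfx s x := by
          simp only [pvPfx]; rw [if_neg h, if_pos hsx, hse']
        rw [List.append_assoc q, hp]
        exact ih q s x true (le_of_lt hsx) (by simp [hsx])
    · rw [if_neg (by omega : ¬ e = x - 1), if_neg hx]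
      have hjoin : PySem.Chars.join ['_'] (List.map pvFmt ((s, e) :: pvRuns x x xs))
          = pvFmt (s, e) ++ ['_'] ++ PySem.Chars.join ['_'] (List.map pvFmt (pvRuns x x xs)) := by
        rcases hr : pvRuns x x xs with _ | ⟨r, rs⟩
        · exact absurd hr (pvRuns_ne_nil x x xs)
        · simp only [List.map]; rw [PySem.Chars.join_cons_cons]
      rw [hjoin]
      by_cases h : s < e
      · -- close the dashed run: write str(last_id) ++ '_' ++ str(x)
        rw [hb, decide_eq_true h, if_pos rfl]
        have hp : (q ++ pvPfx s e) ++ PySem.Int.toChars e ++ ['_'] ++ PySem.Int.toChars x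
            = (q ++ pvFmt (s, e) ++ ['_']) ++ pvPfx x x := by
          simp [pvPfx, pvFmt, h, ne_of_lt h]
        rw [hp, ih (q ++ pvFmt (s, e) ++ ['_']) x x false le_rfl (by simp)]
        simp
      · -- close the single run: write '_' ++ str(x)
        have hse' : s = e := by omega
        rw [hb, decide_eq_false h, if_neg (by simp)]
        have hp : (q ++ pvPfx s e) ++ ['_'] ++ PySem.Int.toChars x
            = (q ++ pvFmt (s, e) ++ ['_']) ++ pvPfx x x := by
          simp [pvPfx, pvFmt, hse']
        rw [hp, ih (q ++ pvFmt (s, e) ++ ['_']) x x false le_rfl (by simp)]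
        simp

-- ===== VERDICT (by name: the statement is the Claim_ definition above) =====
theorem generate_spr_texture_name_spec : Claim_equal_generate_spr_texture_name := by
  intro spr_id _ hpre
  unfold Spec_generate_spr_texture_name
  match spr_id with
  | [] => exact absurd rfl hpre
  | x0 :: rest =>
    have hlast : (pvLoopA rest ("spr_".toList ++ PySem.Int.toChars x0) x0 false).2.1
        = ((PySem.List.pyGet? (x0 :: rest) (-1)).getD 0) := by
      rw [pvLoopA_last, PySem.List.pyGet?_neg_one, pv_getLastD x0 0]
    have hmain := pvLoopA_main rest "spr_".toList x0 x0 false le_rfl (by simp)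
    rw [show ("spr_".toList ++ pvPfx x0 x0) = ("spr_".toList ++ PySem.Int.toChars x0) by simp [pvPfx]]
      at hmain
    simp only [generate_spr_texture_name, generate_spr_texture_name_alt]
    rw [← hmain]
    simp only [pvFinish, ← hlast]
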